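-- pv_equiv track=rewrite | github.com/TschuttGR/pytouchtyping | source/utils.py | toListData
-- ===== SOURCE A (Python) =====
-- def toListData(offset, lines_length, lines_list, h):
-- 	n = lines_length
-- 	# short/long list fix
-- 	out    = []
-- 	if lines_length > h:
-- 		n = h
-- 	for i in range(n):
-- 		out.append(lines_list[(offset+i)%lines_length])
-- 	return( out )
-- ===== SOURCE B (Python) =====
-- def toListData(offset, lines_length, lines_list, h):
--     n = min(lines_length, h)
--     if n <= 0:
--         return []
--     start = offset % lines_length
--     if start + n <= lines_length:
--         return lines_list[start:start + n]
--     return lines_list[start:lines_length] + lines_list[:start + n - lines_length]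
-- ===== Notes on version B (the rewrite author's own statement) =====
-- stated objective: idiomatic
-- what changed: Replaces A's per-element loop that recomputes (offset+i) % lines_length for every output element with a single split-point computation (start = offset % lines_length) and at most two bulk slice copies.
import Mathlib
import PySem

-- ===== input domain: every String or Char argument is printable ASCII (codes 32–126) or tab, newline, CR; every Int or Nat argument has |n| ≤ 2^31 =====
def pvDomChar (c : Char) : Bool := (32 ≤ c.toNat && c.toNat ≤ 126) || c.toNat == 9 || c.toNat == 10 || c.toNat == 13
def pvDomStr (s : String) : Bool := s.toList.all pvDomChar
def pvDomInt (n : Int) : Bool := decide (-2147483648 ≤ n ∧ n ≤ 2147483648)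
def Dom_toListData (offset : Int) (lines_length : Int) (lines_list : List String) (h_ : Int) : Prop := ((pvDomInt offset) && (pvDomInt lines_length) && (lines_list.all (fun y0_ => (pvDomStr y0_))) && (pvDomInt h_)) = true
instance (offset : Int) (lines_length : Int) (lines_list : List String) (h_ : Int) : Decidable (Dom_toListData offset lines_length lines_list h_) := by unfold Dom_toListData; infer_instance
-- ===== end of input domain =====

-- B replaces A's per-element modulo-index loop by one split-point computation and at most
-- two bulk slice copies (objective: idiomatic).

-- ===== PORT A =====
-- literal port of A: n = min via the same if; for i in range(n): out.append(lines_list[(offset+i)%lines_length]).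
-- pyGetD's default "" is never used under Pre_toListData (the index is always in range there).
def toListData (offset : Int) (lines_length : Int) (lines_list : List String) (h_ : Int) : List String :=
  let n := if lines_length > h_ then h_ else lines_length
  (PySem.List.pyRange 0 n 1).foldl
    (fun out i => out ++ [PySem.List.pyGetD lines_list (PySem.Int.mod (offset + i) lines_length) ""]) []

-- ===== PORT B =====
-- literal port of Source B: early return on n <= 0, else one start = offset % lines_length and two slices.
def toListData_alt (offset : Int) (lines_length : Int) (lines_list : List String) (h_ : Int) : List String :=
  let n := min lines_length h_
  if n ≤ 0 then []
  else
    let start := PySem.Int.mod offset lines_length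
    if start + n ≤ lines_length then
      PySem.List.slice lines_list (some start) (some (start + n))
    else
      PySem.List.slice lines_list (some start) (some lines_length) ++
        PySem.List.slice lines_list none (some (start + n - lines_length))

-- ===== PRECONDITION & SPEC =====
-- Pre_ excludes exactly the inputs where A raises IndexError: a positive window (n = min(lines_length, h) > 0)
-- whose accessed indices (all < lines_length) reach past the actual end of lines_list.  On every input where
-- A returns, Pre_ holds (the window fits: start+n ≤ len without wraparound, lines_length ≤ len with it).
def Pre_toListData (offset : Int) (lines_length : Int) (lines_list : List String) (h_ : Int) : Prop :=
  min lines_length h_ ≤ 0 ∨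
    (0 < lines_length ∧
      (PySem.Int.mod offset lines_length + min lines_length h_ ≤ lines_length →
        PySem.Int.mod offset lines_length + min lines_length h_ ≤ (lines_list.length : Int)) ∧
      (lines_length < PySem.Int.mod offset lines_length + min lines_length h_ →
        lines_length ≤ (lines_list.length : Int)))
instance (offset : Int) (lines_length : Int) (lines_list : List String) (h_ : Int) : Decidable (Pre_toListData offset lines_length lines_list h_) := by unfold Pre_toListData; infer_instance

def pvWitness_toListData : Int × Int × List String × Int := (4, 3, ["a", "b", "c"], 2)

def Spec_toListData (offset : Int) (lines_length : Int) (lines_list : List String) (h_ : Int) (out : List String) : Prop := out = toListData_alt offset lines_length lines_list h_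
instance (offset : Int) (lines_length : Int) (lines_list : List String) (h_ : Int) (out : List String) : Decidable (Spec_toListData offset lines_length lines_list h_ out) := by unfold Spec_toListData; infer_instance

-- ===== CLAIM (what is proved, stated in full; the proofs are below) =====
def Claim_equal_toListData : Prop := ∀ (offset : Int) (lines_length : Int) (lines_list : List String) (h_ : Int), Dom_toListData offset lines_length lines_list h_ → Pre_toListData offset lines_length lines_list h_ → Spec_toListData offset lines_length lines_list h_ (toListData offset lines_length lines_list h_)

-- ===== LEMMAS AND PROOFS =====

-- A's 'n' computed with the if equals min.
theorem pv_if_min (L h_ : Int) : (if L > h_ then h_ else L) = min L h_ := by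
  rw [min_def]
  split <;> split <;> omega

-- the wraparound index, resolved: (offset + k) % L is start + k before the split point, start + k - L after.
theorem pv_mod_split (offset L k : Int) (hL : 0 < L) (hk : 0 ≤ k) (hkL : k < L) :
    PySem.Int.mod (offset + k) L =
      if PySem.Int.mod offset L + k < L then PySem.Int.mod offset L + k
      else PySem.Int.mod offset L + k - L := by
  rw [PySem.Int.mod_eq_emod_of_pos hL, PySem.Int.mod_eq_emod_of_pos hL]
  have hs0 : 0 ≤ offset % L := Int.emod_nonneg _ (by omega)
  have hsL : offset % L < L := Int.emod_lt_of_pos _ hL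
  have hoff : offset = offset % L + L * (offset / L) := by
    have := Int.emod_add_mul_ediv offset L; omega
  have h1 : (offset + k) % L = (offset % L + k) % L := by
    conv_lhs => rw [hoff]
    rw [show offset % L + L * (offset / L) + k = offset % L + k + L * (offset / L) by ring,
      Int.add_mul_emod_self_left]
  rw [h1]
  by_cases hc : offset % L + k < L
  · rw [if_pos hc]
    exact Int.emod_eq_of_lt (by omega) (by omega)
  · rw [if_neg hc]
    have h2 : (offset % L + k) % L = (offset % L + k - L) % L := by
      conv_lhs => rw [show offset % L + k = (offset % L + k - L) + L * 1 by ring]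
      rw [Int.add_mul_emod_self_left]
    rw [h2]
    exact Int.emod_eq_of_lt (by omega) (by omega)

-- ===== VERDICT (by name: the statement is the Claim_ definition above) =====
theorem toListData_spec : Claim_equal_toListData := by
  intro offset L xs h_ _hDom hPre
  unfold Spec_toListData toListData toListData_alt
  simp only [pv_if_min]
  by_cases hn : min L h_ ≤ 0
  · rw [if_pos hn, PySem.List.pyRange_one_eq_nil hn]
    rfl
  · rw [if_neg hn]
    have hn0 : 0 < min L h_ := by omega
    have hL : 0 < L := lt_of_lt_of_le hn0 (min_le_left _ _)
    have hnL : min L h_ ≤ L := min_le_left _ _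
    set s := PySem.Int.mod offset L with hs
    have hs0 : 0 ≤ s := PySem.Int.mod_nonneg offset hL
    have hsL : s < L := PySem.Int.mod_lt offset hL
    set n := min L h_ with hndef
    -- Nat shadows
    set sN := s.toNat with hsN
    set nN := n.toNat with hnN
    set LN := L.toNat with hLN
    have hsI : (sN : Int) = s := Int.toNat_of_nonneg hs0
    have hnI : (nN : Int) = n := Int.toNat_of_nonneg (by omega)
    have hLI : (LN : Int) = L := Int.toNat_of_nonneg (by omega)
    rw [PySem.List.foldl_append_singleton_eq_map, PySem.List.pyRange_one, List.map_map,
      List.nil_append, Int.sub_zero]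
    have hidx : ∀ k : Nat, k < nN →
        PySem.Int.mod (offset + (0 + (k : Int))) L =
          if sN + k < LN then ((sN + k : Nat) : Int) else ((sN + k - LN : Nat) : Int) := by
      intro k hk
      rw [zero_add, pv_mod_split offset L k hL (by omega) (by omega)]
      by_cases hsplit : sN + k < LN
      · rw [if_pos (show PySem.Int.mod offset L + (k : Int) < L by omega), if_pos hsplit]
        omega
      · rw [if_neg (show ¬ PySem.Int.mod offset L + (k : Int) < L by omega), if_neg hsplit]
        push_cast; omega
    rcases hPre with h0 | ⟨_, hfit, hwrapfit⟩
    · omega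
    by_cases hw : s + n ≤ L
    · -- no wraparound: one slice
      have hlen : sN + nN ≤ xs.length := by
        have := hfit hw; omega
      rw [if_pos hw, PySem.List.slice_toNat _ hs0 (by omega)]
      have htn : (s + n).toNat - s.toNat = nN := by omega
      rw [htn]
      apply List.ext_getElem
      · simp; omega
      · intro i h1 h2
        have hi : i < nN := by have := h1; simp at this; omega
        simp only [List.getElem_map, List.getElem_range, List.getElem_take, List.getElem_drop,
          Function.comp_apply]
        rw [hidx i hi, if_pos (by omega),
          PySem.List.pyGetD_eq_getElem _ _ (by omega) (by push_cast; omega)]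
        congr 1
    · -- wraparound: two slices
      have hlen : LN ≤ xs.length := by
        have := hwrapfit (by omega); omega
      rw [if_neg hw, PySem.List.slice_toNat _ hs0 (by omega),
        PySem.List.slice_to _ (by omega)]
      have ht1 : L.toNat - s.toNat = LN - sN := by omega
      have ht2 : (s + n - L).toNat = sN + nN - LN := by omega
      rw [ht1, ht2]
      apply List.ext_getElem
      · simp; omega
      · intro i h1 h2
        have hi : i < nN := by have := h1; simp at this; omega
        simp only [List.getElem_map, List.getElem_range, Function.comp_apply]
        by_cases hcase : i < LN - sN
        · rw [List.getElem_append_left (by simp; omega)]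
          simp only [List.getElem_take, List.getElem_drop]
          rw [hidx i hi, if_pos (by omega),
            PySem.List.pyGetD_eq_getElem _ _ (by omega) (by push_cast; omega)]
          congr 1
        · rw [List.getElem_append_right (by simp; omega)]
          simp only [List.getElem_take]
          rw [hidx i hi, if_neg (by omega),
            PySem.List.pyGetD_eq_getElem _ _ (by omega) (by omega)]
          congr 1
          simp
          omega
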